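-- pv_equiv track=rewrite | github.com/MrBrantCode/unitest_baseline | mut_generate/mist_train_taco/taco_12921/solution.py | count_equation_solutions
-- ===== SOURCE A (Python) =====
-- def count_equation_solutions(upper, d, m, N):
--     MDL = 1000000007
--
--     # Initialize the dp array
--     dp = [0] * N
--
--     # Fill the dp array
--     for i in range(N):
--         p = pow(i, d, N)
--         dp[p] += max(0, (upper - i) // N + 1)
--
--     # Calculate the number of solutions
--     ans = 0
--     for x1 in range(N):
--         for x2 in range(N):
--             for x3 in range(N):
--                 if (x1 + x2 + x3) % N == m:
--                     ans += dp[x1] * dp[x2] * dp[x3]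
--                     ans %= MDL
--
--     return ans
-- ===== SOURCE B (Python) =====
-- def count_equation_solutions(upper, d, m, N):
--     MDL = 1000000007
--     # dp[r] = weighted count of x in [0, upper] with pow(x, d, N) == r
--     dp = [0] * N
--     for i in range(N):
--         dp[pow(i, d, N)] += max(0, (upper - i) // N + 1)
--     # (x1 + x2 + x3) % N == m has a solution only for m in [0, N);
--     # then x3 is determined by x1, x2: no third loop needed.
--     if not (0 <= m < N):
--         return 0
--     total = 0
--     for x1 in range(N):
--         for x2 in range(N):
--             total += dp[x1] * dp[x2] * dp[(m - x1 - x2) % N]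
--     return total % MDL
-- ===== Notes on version B (the rewrite author's own statement) =====
-- stated objective: faster
-- what changed: The triple loop over residues is replaced by a double loop: for each (x1, x2) the unique x3 with (x1+x2+x3) % N == m is computed directly as (m-x1-x2) % N (returning 0 immediately when m is outside [0, N)), and the running mod inside the loop is replaced by one final mod.
import Mathlib
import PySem

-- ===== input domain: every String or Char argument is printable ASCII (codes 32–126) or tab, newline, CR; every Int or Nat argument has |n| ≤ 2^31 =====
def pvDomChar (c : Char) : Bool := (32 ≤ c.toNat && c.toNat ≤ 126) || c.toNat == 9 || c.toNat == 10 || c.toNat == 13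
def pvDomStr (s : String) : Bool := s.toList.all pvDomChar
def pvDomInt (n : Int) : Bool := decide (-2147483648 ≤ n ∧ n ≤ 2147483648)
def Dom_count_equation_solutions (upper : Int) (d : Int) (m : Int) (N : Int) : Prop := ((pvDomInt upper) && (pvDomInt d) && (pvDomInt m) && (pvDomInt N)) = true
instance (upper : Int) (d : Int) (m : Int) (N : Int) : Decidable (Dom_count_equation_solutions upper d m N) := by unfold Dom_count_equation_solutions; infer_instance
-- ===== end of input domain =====

-- B replaces A's innermost residue loop by computing the unique matching x3 = (m-x1-x2) % N
-- directly (O(N^2) instead of O(N^3) loop iterations); return values proved equal on Pre_.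


-- ===== PORT A =====
-- The dp-building loop is textually identical in A and in B (Source B keeps it verbatim),
-- so both ports share this one helper transcribing it.
-- pow(i, d, N) = PySem.Int.powMod i d.toNat N: exact for d ≥ 0; for d < 0 it is only
-- reached under Pre_ with N = 1 (single iteration i = 0, where pow(0, d, 1) = 0 = powMod 0 0 1).
def pvDpArray (upper : Int) (d : Int) (N : Int) : List Int :=
  (PySem.List.pyRange 0 N 1).foldl
    (fun dp i =>
      let p := PySem.Int.powMod i d.toNat N
      PySem.List.pySetD dp p
        (PySem.List.pyGetD dp p 0 + max 0 (PySem.Int.floordiv (upper - i) N + 1)))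
    (List.replicate N.toNat 0)

def count_equation_solutions (upper : Int) (d : Int) (m : Int) (N : Int) : Int :=
  let dp := pvDpArray upper d N
  (PySem.List.pyRange 0 N 1).foldl
    (fun ans x1 =>
      (PySem.List.pyRange 0 N 1).foldl
        (fun ans x2 =>
          (PySem.List.pyRange 0 N 1).foldl
            (fun ans x3 =>
              if PySem.Int.mod (x1 + x2 + x3) N = m then
                PySem.Int.mod
                  (ans + PySem.List.pyGetD dp x1 0 * PySem.List.pyGetD dp x2 0 *
                    PySem.List.pyGetD dp x3 0) 1000000007
              else ans)
            ans)
        ans)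
    0

-- ===== PORT B =====
def count_equation_solutions_alt (upper : Int) (d : Int) (m : Int) (N : Int) : Int :=
  let dp := pvDpArray upper d N
  if 0 ≤ m ∧ m < N then
    PySem.Int.mod
      ((PySem.List.pyRange 0 N 1).foldl
        (fun total x1 =>
          (PySem.List.pyRange 0 N 1).foldl
            (fun total x2 =>
              total + PySem.List.pyGetD dp x1 0 * PySem.List.pyGetD dp x2 0 *
                PySem.List.pyGetD dp (PySem.Int.mod (m - x1 - x2) N) 0)
            total)
        0) 1000000007
  else 0

-- ===== PRECONDITION & SPEC =====
-- Python's pow(i, d, N) with negative d raises ValueError unless i is invertible mod N;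
-- for N ≥ 2 the loop hits i = 0 (never invertible), so A raises exactly when d < 0 ∧ N ≥ 2.
def Pre_count_equation_solutions (upper : Int) (d : Int) (m : Int) (N : Int) : Prop :=
  0 ≤ d ∨ N ≤ 1
instance (upper : Int) (d : Int) (m : Int) (N : Int) : Decidable (Pre_count_equation_solutions upper d m N) := by unfold Pre_count_equation_solutions; infer_instance

def pvWitness_count_equation_solutions : Int × Int × Int × Int := (10, 2, 1, 3)

def Spec_count_equation_solutions (upper : Int) (d : Int) (m : Int) (N : Int) (out : Int) : Prop := out = count_equation_solutions_alt upper d m N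
instance (upper : Int) (d : Int) (m : Int) (N : Int) (out : Int) : Decidable (Spec_count_equation_solutions upper d m N out) := by unfold Spec_count_equation_solutions; infer_instance

-- ===== CLAIM (what is proved, stated in full; the proofs are below) =====
def Claim_equal_count_equation_solutions : Prop := ∀ (upper : Int) (d : Int) (m : Int) (N : Int), Dom_count_equation_solutions upper d m N → Pre_count_equation_solutions upper d m N → Spec_count_equation_solutions upper d m N (count_equation_solutions upper d m N)

-- ===== LEMMAS AND PROOFS =====

-- a fold whose step never fires leaves the accumulator unchanged
theorem pv_foldl_id {α : Type} (l : List α) (a : Int) :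
    l.foldl (fun a _ => a) a = a := by
  induction l generalizing a with
  | nil => rfl
  | cons x xs ih => simpa using ih a

theorem pv_foldl_no_match {p : Int → Prop} [DecidablePred p] (f : Int → Int → Int)
    (l : List Int) (a : Int) (h : ∀ x ∈ l, ¬ p x) :
    l.foldl (fun a x => if p x then f a x else a) a = a := by
  induction l generalizing a with
  | nil => rfl
  | cons x xs ih =>
    simp only [List.foldl_cons, if_neg (h x (by simp))]
    exact ih a (fun x hx => h x (by simp [hx]))

-- the unique x in [0, N) with (c + x) % N = m (for 0 ≤ m < N) is (m - c) % N
theorem pv_unique_residue (N m c x : Int) (hN : 0 < N) (hm0 : 0 ≤ m) (hmN : m < N)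
    (hx0 : 0 ≤ x) (hxN : x < N) : ((c + x) % N = m ↔ x = (m - c) % N) := by
  constructor
  · intro h
    have : (m - c) % N = x % N := by
      rw [← h, Int.sub_emod, Int.emod_emod_of_dvd _ dvd_rfl, ← Int.sub_emod]
      ring_nf
    rw [this, Int.emod_eq_of_lt hx0 hxN]
  · intro h
    subst h
    rw [Int.add_emod, Int.emod_emod_of_dvd _ dvd_rfl, ← Int.add_emod]
    have : c + (m - c) = m := by ring
    rw [this, Int.emod_eq_of_lt hm0 hmN]

-- collapsing A's innermost loop: exactly one x3 in range(N) fires, at (m - c) % N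
theorem pv_inner_collapse (N m c k : Int) (F : Int → Int) (hN : 0 < N)
    (hm0 : 0 ≤ m) (hmN : m < N) (a : Int) :
    (PySem.List.pyRange 0 N 1).foldl
      (fun a x => if (c + x) % N = m then (a + k * F x) % 1000000007 else a) a
    = (a + k * F ((m - c) % N)) % 1000000007 := by
  set t := (m - c) % N with ht
  have ht0 : 0 ≤ t := Int.emod_nonneg _ (by omega)
  have htN : t < N := Int.emod_lt_of_pos _ hN
  have h1 : PySem.List.pyRange 0 N 1
      = PySem.List.pyRange 0 t 1 ++ PySem.List.pyRange t N 1 :=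
    PySem.List.pyRange_one_append 0 t N (by omega) (by omega)
  have h2 : PySem.List.pyRange t N 1 = t :: PySem.List.pyRange (t + 1) N 1 :=
    PySem.List.pyRange_one_cons htN
  have hnom : ∀ (l : List Int), (∀ x ∈ l, 0 ≤ x ∧ x < N ∧ x ≠ t) →
      ∀ (b : Int), l.foldl
        (fun a x => if (c + x) % N = m then (a + k * F x) % 1000000007 else a) b = b := by
    intro l hl b
    refine pv_foldl_no_match _ l b ?_
    intro x hx hc
    obtain ⟨hx0, hxN, hxt⟩ := hl x hx
    exact hxt ((pv_unique_residue N m c x hN hm0 hmN hx0 hxN).mp hc)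
  rw [h1, h2, List.foldl_append]
  rw [hnom (PySem.List.pyRange 0 t 1) (by
      intro x hx
      rw [PySem.List.mem_pyRange_one] at hx
      omega) a]
  simp only [List.foldl_cons]
  have hfire : (c + t) % N = m := (pv_unique_residue N m c t hN hm0 hmN ht0 htN).mpr rfl
  rw [if_pos hfire]
  refine hnom (PySem.List.pyRange (t + 1) N 1) ?_ _
  intro x hx
  rw [PySem.List.mem_pyRange_one] at hx
  omega

-- running-mod accumulation equals the sum taken mod once
theorem pv_foldl_mod_sum (l : List Int) (t : Int → Int) (a : Int) :
    l.foldl (fun a x => (a + t x) % 1000000007) (a % 1000000007)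
      = (a + (l.map t).sum) % 1000000007 := by
  induction l generalizing a with
  | nil => simp
  | cons x xs ih =>
    simp only [List.foldl_cons, List.map_cons, List.sum_cons]
    have h1 : (a % 1000000007 + t x) % 1000000007 = (a + t x) % 1000000007 := by
      rw [Int.add_emod, Int.emod_emod_of_dvd _ dvd_rfl, ← Int.add_emod]
    rw [h1, ih (a + t x)]
    congr 1; ring

-- the same, one level out: a fold of running-mod inner folds is the double sum mod once
theorem pv_foldl2_mod_sum (l : List Int) (R : List Int) (g : Int → Int → Int) (a : Int) :
    l.foldl (fun a x1 => R.foldl (fun a x2 => (a + g x1 x2) % 1000000007) a) (a % 1000000007)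
      = (a + (l.map (fun x1 => (R.map (g x1)).sum)).sum) % 1000000007 := by
  induction l generalizing a with
  | nil => simp
  | cons x xs ih =>
    simp only [List.foldl_cons, List.map_cons, List.sum_cons]
    rw [pv_foldl_mod_sum R (g x) a, ih (a + (R.map (g x)).sum)]
    congr 1; ring

theorem pv_foldl2_mod_sum_zero (l : List Int) (R : List Int) (g : Int → Int → Int) :
    l.foldl (fun a x1 => R.foldl (fun a x2 => (a + g x1 x2) % 1000000007) a) 0
      = (l.map (fun x1 => (R.map (g x1)).sum)).sum % 1000000007 := by
  have h := pv_foldl2_mod_sum l R g 0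
  simpa using h

-- ===== VERDICT (by name: the statement is the Claim_ definition above) =====
theorem count_equation_solutions_spec : Claim_equal_count_equation_solutions := by
  intro upper d m N _ _
  unfold Spec_count_equation_solutions
  simp only [count_equation_solutions, count_equation_solutions_alt]
  set dp := pvDpArray upper d N with hdp
  set F : Int → Int := fun j => PySem.List.pyGetD dp j 0 with hF
  have hFj : ∀ j, PySem.List.pyGetD dp j 0 = F j := fun j => rfl
  simp only [hFj]
  by_cases hN : 0 < N
  · have hmodN : ∀ a : Int, PySem.Int.mod a N = a % N :=
      fun a => PySem.Int.mod_eq_emod_of_pos hN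
    have hmodM : ∀ a : Int, PySem.Int.mod a 1000000007 = a % 1000000007 :=
      fun a => PySem.Int.mod_eq_emod_of_pos (by norm_num)
    simp only [hmodN, hmodM]
    by_cases hm : 0 ≤ m ∧ m < N
    · rw [if_pos hm]
      have step1 : ∀ (x1 x2 a : Int),
          (PySem.List.pyRange 0 N 1).foldl
            (fun a x3 => if (x1 + x2 + x3) % N = m then
                (a + F x1 * F x2 * F x3) % 1000000007 else a) a
          = (a + F x1 * F x2 * F ((m - (x1 + x2)) % N)) % 1000000007 :=
        fun x1 x2 a => pv_inner_collapse N m (x1 + x2) (F x1 * F x2) F hN hm.1 hm.2 a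
      simp only [step1]
      rw [pv_foldl2_mod_sum_zero (PySem.List.pyRange 0 N 1) (PySem.List.pyRange 0 N 1)
        (fun x1 x2 => F x1 * F x2 * F ((m - (x1 + x2)) % N))]
      simp only [PySem.List.foldl_add]
      simp only [zero_add, sub_sub]
    · rw [if_neg hm]
      have hfalse : ∀ (x1 x2 x3 : Int), ¬ ((x1 + x2 + x3) % N = m) := by
        intro x1 x2 x3 hc
        have h0 := Int.emod_nonneg (x1 + x2 + x3) (by omega : N ≠ 0)
        have h1 := Int.emod_lt_of_pos (x1 + x2 + x3) hN
        omega
      have h3 : ∀ (x1 x2 a : Int),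
          (PySem.List.pyRange 0 N 1).foldl
            (fun a x3 => if (x1 + x2 + x3) % N = m then
                (a + F x1 * F x2 * F x3) % 1000000007 else a) a = a :=
        fun x1 x2 a => pv_foldl_no_match _ _ a (fun x _ => hfalse x1 x2 x)
      simp only [h3, pv_foldl_id]
  · have hnil : PySem.List.pyRange 0 N 1 = [] := PySem.List.pyRange_one_eq_nil (by omega)
    rw [hnil, if_neg (by omega)]
    rfl
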